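-- pv_equiv track=rewrite | github.com/JoshisonGitHub/SAT-Solver | all_code.py | give_values
-- ===== SOURCE A (Python) =====
-- def give_values(x):
--     listofvalues = []
--     for clause in x:
--
--         for val in clause:
--             numb = 0
--             curval = abs(val)
--             for i in range(0, len(listofvalues)):
--                 if(listofvalues[i] == curval):
--                     numb = 1
--             if (numb == 0):
--                listofvalues.append(curval)
--     listofvalues.sort()
--     return listofvalues
-- ===== SOURCE B (Python) =====
-- def give_values(x):
--     vals = []
--     for clause in x:
--         for val in clause:
--             vals.append(abs(val))
--     vals.sort()
--     result = []
--     for v in vals: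
--         if not result or result[-1] != v:
--             result.append(v)
--     return result
-- ===== Notes on version B (the rewrite author's own statement) =====
-- stated objective: faster
-- what changed: A dedups each value by a linear scan of the accumulator before sorting; B flattens all absolute values, sorts the full list once, and removes adjacent duplicates in one pass.
import Mathlib
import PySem

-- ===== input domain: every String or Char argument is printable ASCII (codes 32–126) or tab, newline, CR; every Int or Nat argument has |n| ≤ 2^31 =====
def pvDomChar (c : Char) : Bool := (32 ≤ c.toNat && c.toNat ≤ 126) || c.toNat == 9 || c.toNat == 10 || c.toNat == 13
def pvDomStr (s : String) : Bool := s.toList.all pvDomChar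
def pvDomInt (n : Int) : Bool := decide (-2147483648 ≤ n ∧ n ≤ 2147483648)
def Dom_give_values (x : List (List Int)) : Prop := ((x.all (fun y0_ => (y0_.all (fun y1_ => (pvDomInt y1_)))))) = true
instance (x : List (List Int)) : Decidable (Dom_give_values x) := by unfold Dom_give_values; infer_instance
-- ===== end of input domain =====

-- B flattens all absolute values, sorts the full list once, and drops adjacent duplicates in
-- one pass, instead of A's linear membership scan of the accumulator before each append.

-- ===== PORT A =====
def give_values (x : List (List Int)) : List Int :=
  let listofvalues : List Int :=
    x.foldl (fun listofvalues clause =>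
      clause.foldl (fun listofvalues val =>
        let curval : Int := |val|
        -- numb scan: for i in range(0, len(listofvalues)): if listofvalues[i] == curval: numb = 1
        let numb : Int :=
          (PySem.List.pyRange 0 listofvalues.length 1).foldl
            (fun numb i => if PySem.List.pyGetD listofvalues i 0 = curval then 1 else numb) 0
        if numb = 0 then listofvalues ++ [curval] else listofvalues) listofvalues) []
  PySem.List.sorted listofvalues (fun v => v) false

-- ===== PORT B =====
def give_values_alt (x : List (List Int)) : List Int :=
  let vals : List Int :=
    x.foldl (fun vals clause => clause.foldl (fun vals v => vals ++ [|v|]) vals) []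
  let svals := PySem.List.sorted vals (fun v => v) false
  svals.foldl (fun result v =>
    if result = [] ∨ PySem.List.pyGet? result (-1) ≠ some v then result ++ [v] else result) []

-- ===== PRECONDITION & SPEC =====
def Spec_give_values (x : List (List Int)) (out : List Int) : Prop := out = give_values_alt x
instance (x : List (List Int)) (out : List Int) : Decidable (Spec_give_values x out) := by unfold Spec_give_values; infer_instance

-- ===== CLAIM (what is proved, stated in full; the proofs are below) =====
def Claim_equal_give_values : Prop := ∀ (x : List (List Int)), Dom_give_values x → Spec_give_values x (give_values x)

-- ===== LEMMAS AND PROOFS =====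

-- A's accumulation, seen over the flattened list of absolute values.
def pvDD (L : List Int) (a : List Int) : List Int :=
  L.foldl (fun a v => if v ∈ a then a else a ++ [v]) a

-- B's adjacent-duplicate removal pass.
def pvADJ (S : List Int) (r : List Int) : List Int :=
  S.foldl (fun r v => if r = [] ∨ r.getLast? ≠ some v then r ++ [v] else r) r

-- the inner 0/1 fold is a membership test
theorem pvFold_mem (acc : List Int) (c : Int) (init : Int) :
    acc.foldl (fun numb v => if v = c then (1 : Int) else numb) init
      = if c ∈ acc then 1 else init := by
  induction acc generalizing init with
  | nil => simp
  | cons h t ih =>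
      simp only [List.foldl_cons]
      rw [ih]
      by_cases hc : h = c
      · simp [hc]
      · by_cases hm : c ∈ t <;> simp [hc, hm, Ne.symm hc]

theorem pvA_numb (acc : List Int) (c : Int) :
    ((PySem.List.pyRange 0 acc.length 1).foldl
      (fun numb i => if PySem.List.pyGetD acc i 0 = c then (1 : Int) else numb) 0)
    = (if c ∈ acc then 1 else 0) := by
  rw [PySem.List.foldl_pyRange_zero_pyGetD' acc 0 (fun numb v => if v = c then (1 : Int) else numb) 0]
  exact pvFold_mem acc c 0

-- A's double fold is pvDD over the flattened abs list
theorem pvA_eq_pvDD (x : List (List Int)) :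
    x.foldl (fun listofvalues clause =>
      clause.foldl (fun listofvalues val =>
        let curval : Int := |val|
        let numb : Int :=
          (PySem.List.pyRange 0 listofvalues.length 1).foldl
            (fun numb i => if PySem.List.pyGetD listofvalues i 0 = curval then 1 else numb) 0
        if numb = 0 then listofvalues ++ [curval] else listofvalues) listofvalues) []
      = pvDD ((x.flatten).map (fun v => |v|)) [] := by
  rw [pvDD, List.foldl_map, List.foldl_flatten]
  congr 1
  funext a clause
  congr 1
  funext a' v
  by_cases hm : |v| ∈ a' <;> simp [pvA_numb, hm]

theorem pvDD_mem (L : List Int) (a : List Int) (b : Int) :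
    b ∈ pvDD L a ↔ b ∈ a ∨ b ∈ L := by
  induction L generalizing a with
  | nil => simp [pvDD]
  | cons h t ih =>
      simp only [pvDD, List.foldl_cons] at *
      by_cases hm : h ∈ a
      · rw [if_pos hm, ih]
        constructor
        · rintro (h1 | h1)
          exacts [Or.inl h1, Or.inr (List.mem_cons_of_mem _ h1)]
        · rintro (h1 | h1)
          · exact Or.inl h1
          · rcases List.mem_cons.mp h1 with rfl | h2
            exacts [Or.inl hm, Or.inr h2]
      · rw [if_neg hm, ih]
        simp only [List.mem_append, List.mem_cons]
        tauto

theorem pvDD_nodup (L : List Int) (a : List Int) (ha : a.Nodup) : (pvDD L a).Nodup := by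
  induction L generalizing a with
  | nil => simpa [pvDD]
  | cons h t ih =>
      simp only [pvDD, List.foldl_cons]
      by_cases hm : h ∈ a
      · rw [if_pos hm]; exact ih a ha
      · rw [if_neg hm]
        refine ih (a ++ [h]) ?_
        rw [List.nodup_append]
        exact ⟨ha, List.nodup_singleton h, fun a1 h1 b1 hb1 he => hm ((List.mem_singleton.mp hb1 ▸ he) ▸ h1)⟩

-- the last element of a strictly increasing list bounds its members
theorem pvLastMax (r : List Int) (hr : r.Pairwise (· < ·)) (b m : Int)
    (hb : b ∈ r) (hm : r.getLast? = some m) : b ≤ m := by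
  rcases r.eq_nil_or_concat with rfl | ⟨t, z, rfl⟩
  · simp at hb
  · rw [List.concat_eq_append] at hr hb hm
    rw [List.getLast?_concat] at hm
    have hzm : z = m := Option.some.inj hm
    rcases List.mem_append.mp hb with hb | hb
    · have := (List.pairwise_append.mp hr).2.2 b hb z (by simp)
      omega
    · simp at hb; omega

theorem pvADJ_spec (S : List Int) (r : List Int) (hS : S.Pairwise (· ≤ ·))
    (hr : r.Pairwise (· < ·)) (hrs : ∀ b ∈ r, ∀ s ∈ S, b ≤ s) :
    (pvADJ S r).Pairwise (· < ·) ∧ ∀ b, (b ∈ pvADJ S r ↔ b ∈ r ∨ b ∈ S) := by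
  induction S generalizing r with
  | nil => simpa [pvADJ]
  | cons v S' ih =>
      obtain ⟨hvS', hS'⟩ := List.pairwise_cons.mp hS
      simp only [pvADJ, List.foldl_cons] at *
      by_cases hcond : r = [] ∨ r.getLast? ≠ some v
      · rw [if_pos hcond]
        have hr' : (r ++ [v]).Pairwise (· < ·) := by
          rw [List.pairwise_append]
          refine ⟨hr, by simp, ?_⟩
          intro a ha c hc
          obtain rfl : c = v := List.mem_singleton.mp hc
          have hle : a ≤ c := hrs a ha c (List.mem_cons_self)
          rcases lt_or_eq_of_le hle with h | h
          · exact h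
          · exfalso
            subst h
            have hne : r.getLast? ≠ some a := by
              rcases hcond with h0 | h0
              · subst h0; simp at ha
              · exact h0
            have hsome : r.getLast?.isSome := List.getLast?_isSome.mpr (by rintro rfl; simp at ha)
            obtain ⟨m, hm⟩ := Option.isSome_iff_exists.mp hsome
            have h1 : a ≤ m := pvLastMax r hr a m ha hm
            have h2 : m ≤ a := hrs m (List.mem_of_getLast? hm) a (List.mem_cons_self)
            exact hne (by rw [hm]; congr 1; omega)
        have hrs' : ∀ b ∈ r ++ [v], ∀ s ∈ S', b ≤ s := by
          intro b hb s hs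
          rcases List.mem_append.mp hb with hb | hb
          · exact hrs b hb s (List.mem_cons_of_mem _ hs)
          · obtain rfl : b = v := List.mem_singleton.mp hb
            exact hvS' s hs
        obtain ⟨h1, h2⟩ := ih (r ++ [v]) hS' hr' hrs'
        refine ⟨h1, fun b => ?_⟩
        rw [h2 b]
        simp only [List.mem_append, List.mem_cons]
        tauto
      · rw [if_neg hcond]
        simp only [not_or, ne_eq, not_not] at hcond
        have hvr : v ∈ r := List.mem_of_getLast? hcond.2
        have hrs' : ∀ b ∈ r, ∀ s ∈ S', b ≤ s := fun b hb s hs => hrs b hb s (List.mem_cons_of_mem _ hs)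
        obtain ⟨h1, h2⟩ := ih r hS' hr hrs'
        refine ⟨h1, fun b => ?_⟩
        rw [h2 b]
        constructor
        · tauto
        · rintro (hb | hb)
          · exact Or.inl hb
          · rcases List.mem_cons.mp hb with rfl | hb
            exacts [Or.inl hvr, Or.inr hb]

-- ===== VERDICT (by name: the statement is the Claim_ definition above) =====
theorem give_values_spec : Claim_equal_give_values := by
  intro x _
  show give_values x = give_values_alt x
  simp only [give_values, give_values_alt, PySem.List.pyGet?_neg_one]
  rw [pvA_eq_pvDD, ← List.foldl_flatten, PySem.List.foldl_append_singleton_eq_map,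
    List.nil_append]
  set L : List Int := (x.flatten).map (fun v => |v|) with hL
  set S : List Int := PySem.List.sorted L (fun v => v) false with hS
  have hSord : S.Pairwise (· ≤ ·) := PySem.List.sorted_pairwise L (fun v => v)
  obtain ⟨hD1, hD2⟩ := pvADJ_spec S [] hSord (by simp) (by simp)
  have hLAnd : (pvDD L []).Nodup := pvDD_nodup L [] (by simp)
  have hDnd : (pvADJ S []).Nodup := hD1.imp (fun h => ne_of_lt h)
  have hperm : (pvADJ S []).Perm (pvDD L []) := by
    rw [List.perm_ext_iff_of_nodup hDnd hLAnd]
    intro a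
    rw [hD2 a, pvDD_mem]
    simp [hS, PySem.List.mem_sorted]
  exact PySem.List.sorted_eq_of_perm_of_pairwise_lt (pvDD L []) (pvADJ S []) (fun v => v) hperm hD1
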